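-- pv_equiv track=rewrite | github.com/MithilRocks/python-homeworks | dictionaries/my_fromkeys.py | my_from_keys
-- ===== SOURCE A (Python) =====
-- def my_from_keys(my_list, my_elements):
--     my_dict = {}
--     x, y = 0, 0
--
--     while x < len(my_list):
--
--         if y >= len(my_elements):
--             my_dict[my_list[x]] = None
--         else:
--             my_dict[my_list[x]] = my_elements[y]
--             y += 1
--
--         x += 1
--
--     return my_dict
-- ===== SOURCE B (Python) =====
-- def my_from_keys(my_list, my_elements):
--     n = len(my_elements)
--     last = {k: i for i, k in enumerate(my_list)}
--     return {k: (my_elements[i] if i < n else None) for k, i in last.items()}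
-- ===== Notes on version B (the rewrite author's own statement) =====
-- stated objective: alternative
-- what changed: Instead of A's single branching while loop with two cursors that overwrites duplicate keys as it goes, B first builds a last-occurrence index map (dict comprehension over enumerate) and then, in a second staged pass, maps each distinct key's last index to its element (or None past the end).
import Mathlib
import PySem

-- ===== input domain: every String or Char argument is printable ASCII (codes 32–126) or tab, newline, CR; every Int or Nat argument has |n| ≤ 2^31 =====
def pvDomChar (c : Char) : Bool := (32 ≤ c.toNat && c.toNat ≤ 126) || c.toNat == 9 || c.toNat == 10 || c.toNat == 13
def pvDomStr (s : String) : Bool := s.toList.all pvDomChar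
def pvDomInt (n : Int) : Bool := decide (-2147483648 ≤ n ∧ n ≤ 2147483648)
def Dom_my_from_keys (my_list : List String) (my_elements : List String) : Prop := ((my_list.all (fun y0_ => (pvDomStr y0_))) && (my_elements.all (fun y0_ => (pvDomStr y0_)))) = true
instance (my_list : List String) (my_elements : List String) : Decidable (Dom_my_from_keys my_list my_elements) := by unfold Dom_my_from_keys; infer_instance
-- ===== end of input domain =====

-- B replaces A's two-cursor branching while loop by two staged passes: a last-occurrence index map, then a map from indices to elements (alternative decomposition; same cost).


-- ===== PORT A =====
-- the while loop: state is (my_dict, y), x the loop index; the pyGet? none branches are unreachable (x, y stay in range)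
def myFromKeysLoop (my_list my_elements : List String) (x y : Int)
    (d : PySem.Dict String (Option String)) : PySem.Dict String (Option String) :=
  if _hx : x < (my_list.length : Int) then
    if y ≥ (my_elements.length : Int) then
      match PySem.List.pyGet? my_list x with
      | some k => myFromKeysLoop my_list my_elements (x + 1) y (d.insert k none)
      | none => d
    else
      match PySem.List.pyGet? my_list x, PySem.List.pyGet? my_elements y with
      | some k, some v => myFromKeysLoop my_list my_elements (x + 1) (y + 1) (d.insert k (some v))
      | _, _ => d
  else d
termination_by ((my_list.length : Int) - x).toNat
decreasing_by all_goals omega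

def my_from_keys (my_list : List String) (my_elements : List String) : List (String × Option String) :=
  (myFromKeysLoop my_list my_elements 0 0 PySem.Dict.empty).items

-- ===== PORT B =====
-- pass 1: last = {k: i for i, k in enumerate(my_list)} (last-occurrence index of each key);
-- pass 2: {k: (my_elements[i] if i < n else None) for k, i in last.items()}
def my_from_keys_alt (my_list : List String) (my_elements : List String) : List (String × Option String) :=
  let n : Int := my_elements.length
  let last : PySem.Dict String Int :=
    (PySem.List.enumerate my_list).foldl (fun d p => d.insert p.2 p.1) PySem.Dict.empty
  (last.items.foldl
      (fun d p => d.insert p.1 (if p.2 < n then PySem.List.pyGet? my_elements p.2 else none))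
      PySem.Dict.empty).items

-- ===== PRECONDITION & SPEC =====
def Spec_my_from_keys (my_list : List String) (my_elements : List String) (out : List (String × Option String)) : Prop := out = my_from_keys_alt my_list my_elements
instance (my_list : List String) (my_elements : List String) (out : List (String × Option String)) : Decidable (Spec_my_from_keys my_list my_elements out) := by unfold Spec_my_from_keys; infer_instance

-- ===== CLAIM (what is proved, stated in full; the proofs are below) =====
def Claim_equal_my_from_keys : Prop := ∀ (my_list : List String) (my_elements : List String), Dom_my_from_keys my_list my_elements → Spec_my_from_keys my_list my_elements (my_from_keys my_list my_elements)

-- ===== LEMMAS AND PROOFS =====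

-- A's loop is a fold of inserts over my_list zipped with the None-padded element list
lemma myFromKeysLoop_eq (Lt : List String) :
    ∀ (L E : List String) (x y : Int) (d : PySem.Dict String (Option String)),
    0 ≤ x → 0 ≤ y → y ≤ (E.length : Int) → Lt = L.drop x.toNat →
    myFromKeysLoop L E x y d =
      (Lt.zip ((E.drop y.toNat).map some ++
        List.replicate (Lt.length - (E.drop y.toNat).length) (none : Option String))).foldl
        (fun d p => d.insert p.1 p.2) d := by
  induction Lt with
  | nil =>
    intro L E x y d hx hy hyE hdrop
    have hlen : (L.length : Int) ≤ x := by
      have := congrArg List.length hdrop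
      simp [List.length_drop] at this
      omega
    rw [myFromKeysLoop]
    simp [not_lt.mpr hlen]
  | cons k rest ih =>
    intro L E x y d hx hy hyE hdrop
    have hxlen : x.toNat < L.length := by
      have := congrArg List.length hdrop
      simp [List.length_drop] at this
      omega
    have hxI : x < (L.length : Int) := by omega
    have hgetL : PySem.List.pyGet? L x = some k := by
      rw [PySem.List.pyGet?_of_nonneg L hx]
      have : (L.drop x.toNat)[0]? = some k := by rw [← hdrop]; rfl
      simpa [List.getElem?_drop] using this
    have hrest : rest = L.drop (x + 1).toNat := by
      have : (k :: rest).drop 1 = (L.drop x.toNat).drop 1 := by rw [hdrop]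
      simpa [List.drop_drop, show x.toNat + 1 = (x+1).toNat by omega] using this
    rw [myFromKeysLoop]
    simp only [hxI, dite_true]
    by_cases hy2 : y ≥ (E.length : Int)
    · have hEdrop : E.drop y.toNat = [] := by
        apply List.drop_eq_nil_of_le; omega
      rw [if_pos hy2, hgetL]
      show myFromKeysLoop L E (x + 1) y (d.insert k none) = _
      rw [ih L E (x + 1) y (d.insert k none) (by omega) hy hyE hrest]
      simp [hEdrop, List.replicate_succ]
    · have hylen : y.toNat < E.length := by omega
      have hEdrop : E.drop y.toNat = E[y.toNat] :: E.drop (y + 1).toNat := by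
        have h1 : (y + 1).toNat = y.toNat + 1 := by omega
        rw [List.drop_eq_getElem_cons hylen, h1]
      have hgetE : PySem.List.pyGet? E y = some E[y.toNat] := by
        rw [PySem.List.pyGet?_of_nonneg E hy]
        simp [List.getElem?_eq_getElem hylen]
      rw [if_neg hy2, hgetL, hgetE]
      show myFromKeysLoop L E (x + 1) (y + 1) (d.insert k (some E[y.toNat])) = _
      rw [ih L E (x + 1) (y + 1) (d.insert k (some E[y.toNat])) (by omega) (by omega) (by omega) hrest]
      simp [hEdrop]

-- the padded zip is the enumerate list with values looked up by index
lemma zip_pad_eq (L E : List String) :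
    L.zip (E.map some ++ List.replicate (L.length - E.length) (none : Option String)) =
      (PySem.List.enumerate L).map
        (fun p => (p.2, if p.1 < (E.length : Int) then PySem.List.pyGet? E p.1 else none)) := by
  apply List.ext_getElem
  · simp [PySem.List.length_enumerate]; omega
  · intro i h1 h2
    have hiL : i < L.length := by
      simpa [PySem.List.length_enumerate] using h2
    have hplen : i < (E.map some ++
        List.replicate (L.length - E.length) (none : Option String)).length := by
      simp; omega
    rw [List.getElem_zip, List.getElem_map, PySem.List.getElem_enumerate]
    simp only [Int.zero_add]
    by_cases hi : i < E.length
    · have hpad : (E.map some ++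
          List.replicate (L.length - E.length) (none : Option String))[i]'hplen =
          some E[i] := by
        rw [List.getElem_append_left (by simpa using hi)]
        simp
      have hget : PySem.List.pyGet? E (i : Int) = some E[i] := by
        rw [PySem.List.pyGet?_natCast]
        simp [List.getElem?_eq_getElem hi]
      simp [hpad, show ((i : Int) < (E.length : Int)) from by exact_mod_cast hi]
    · have hlen : E.length ≤ i := by omega
      have hpad : (E.map some ++
          List.replicate (L.length - E.length) (none : Option String))[i]'hplen =
          (none : Option String) := by
        rw [List.getElem_append_right (by simpa using hlen)]
        simp
      simp [hpad, show ¬ ((i : Int) < (E.length : Int)) from by exact_mod_cast hi]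

-- master lemma: items of a keyed insert-fold — keys in first-occurrence order, values from the last occurrence
lemma items_foldl_insert_by {α ν : Type} (key : α → String) (v : α → ν) (l : List α) :
    ((l.foldl (fun d a => d.insert (key a) (v a)) PySem.Dict.empty)).items =
      (PySem.Set.ofList (l.map key)).filterMap
        (fun k => (l.reverse.find? (fun a => key a == k)).map (fun a => (k, v a))) := by
  induction l using List.reverseRecOn with
  | nil => simp [PySem.Dict.empty]
  | append_singleton l a ih =>
    rw [List.foldl_append, List.foldl_cons, List.foldl_nil]
    have hkeys : (l.foldl (fun d a => d.insert (key a) (v a)) PySem.Dict.empty).keys =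
        PySem.Set.ofList (l.map key) := by
      rw [PySem.Dict.keys_foldl_insert_key]
      simp [PySem.Set.ofList_eq_foldl, PySem.Set.update, PySem.Dict.keys_empty]
    have hS' : PySem.Set.ofList ((l ++ [a]).map key) =
        PySem.Set.add (PySem.Set.ofList (l.map key)) (key a) := by
      simp [PySem.Set.ofList_eq_foldl]
    have hrev : (l ++ [a]).reverse = a :: l.reverse := by simp
    by_cases hmem : key a ∈ l.map key
    · have hcont : (l.foldl (fun d a => d.insert (key a) (v a)) PySem.Dict.empty).contains (key a) = true := by
        rw [PySem.Dict.contains_iff_mem_keys, hkeys]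
        exact (PySem.Set.mem_ofList _ _).2 hmem
      have hadd : PySem.Set.add (PySem.Set.ofList (l.map key)) (key a) =
          PySem.Set.ofList (l.map key) := by
        simp [PySem.Set.add, PySem.Set.contains, (PySem.Set.mem_ofList _ _).2 hmem]
      rw [PySem.Dict.items_insert_of_contains _ _ hcont, ih, List.map_filterMap, hS', hadd, hrev]
      apply List.filterMap_congr
      intro k _
      rw [List.find?_cons]
      by_cases hk : key a = k
      · subst hk
        simp only [beq_self_eq_true]
        obtain ⟨b, hb, hkb⟩ := List.mem_map.1 hmem
        have hsome : (l.reverse.find? (fun x => key x == key a)).isSome := by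
          rw [List.find?_isSome]
          exact ⟨b, by simpa using hb, by simp [hkb]⟩
        obtain ⟨c, hc⟩ := Option.isSome_iff_exists.1 hsome
        simp [hc]
      · have hba : (key a == k) = false := beq_eq_false_iff_ne.2 hk
        have hkb : (k == key a) = false := beq_eq_false_iff_ne.2 (fun h => hk h.symm)
        simp only [hba, Option.map_map]
        congr 1
        funext b
        simp [Function.comp, hkb]
    · have hcont : (l.foldl (fun d a => d.insert (key a) (v a)) PySem.Dict.empty).contains (key a) = false := by
        rw [← Bool.not_eq_true]
        intro hc
        exact hmem ((PySem.Set.mem_ofList _ _).1 (hkeys ▸ (PySem.Dict.contains_iff_mem_keys _ _).1 hc))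
      have hadd : PySem.Set.add (PySem.Set.ofList (l.map key)) (key a) =
          PySem.Set.ofList (l.map key) ++ [key a] := by
        have hnm : ¬ key a ∈ PySem.Set.ofList (l.map key) :=
          fun h => hmem ((PySem.Set.mem_ofList _ _).1 h)
        simp [PySem.Set.add, PySem.Set.contains, hnm]
      rw [PySem.Dict.items_insert_of_not_contains _ _ hcont, ih, hS', hadd, hrev,
        List.filterMap_append]
      congr 1
      · apply List.filterMap_congr
        intro k hk
        have hkmem : k ∈ l.map key := (PySem.Set.mem_ofList _ _).1 hk
        have hne : (key a == k) = false := by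
          simp only [beq_eq_false_iff_ne, ne_eq]
          intro h; exact hmem (h ▸ hkmem)
        rw [List.find?_cons, hne]
      · simp [List.find?_cons]

-- a nodup list is already its own set
lemma set_ofList_of_nodup (l : List String) (h : l.Nodup) : PySem.Set.ofList l = l := by
  induction l using List.reverseRecOn with
  | nil => simp [PySem.Set.ofList_eq_foldl]
  | append_singleton l x ih =>
    have hnd : l.Nodup := (List.sublist_append_left l [x]).nodup h
    have hx : x ∉ l := fun hm => (List.disjoint_of_nodup_append h) hm (by simp)
    rw [PySem.Set.ofList_eq_foldl, List.foldl_append, ← PySem.Set.ofList_eq_foldl]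
    simp [PySem.Set.add, PySem.Set.contains, ih hnd, hx]

-- fst components of the filterMap shape produced by the master lemma
lemma map_fst_filterMap_shape {α ν : Type} (S : List String)
    (o : String → Option α) (v : String → α → ν) :
    ((S.filterMap (fun k => (o k).map (fun a => (k, v k a)))).map (fun q => q.1)) =
      S.filter (fun k => (o k).isSome) := by
  induction S with
  | nil => simp
  | cons k S ih =>
    cases h : o k <;> simp [h, ih]

-- finding a key in the (reversed) filterMap shape recovers that key's own entry
lemma find?_filterMap_shape {α ν : Type} (o : String → Option α) (w : String → α → ν) :
    ∀ (S : List String), S.Nodup → ∀ k ∈ S, (o k).isSome →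
    ((S.filterMap (fun k' => (o k').map (fun a => (k', w k' a)))).reverse.find?
        (fun q => q.1 == k)) = (o k).map (fun a => (k, w k a)) := by
  intro S
  induction S with
  | nil => intro _ k hk; exact absurd hk (List.not_mem_nil)
  | cons k' S ih =>
    intro hnd k hkmem hsome
    have hnd' : S.Nodup := hnd.of_cons
    cases h : o k' with
    | none =>
      rcases List.mem_cons.1 hkmem with rfl | hkS
      · rw [h] at hsome; simp at hsome
      · simpa [List.filterMap_cons, h] using ih hnd' k hkS hsome
    | some a =>
      rw [List.filterMap_cons, h]
      simp only [Option.map_some, List.reverse_cons, List.find?_append]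
      rcases List.mem_cons.1 hkmem with rfl | hkS
      · have hknotS : k ∉ S := (List.nodup_cons.1 hnd).1
        have hnone : ((S.filterMap (fun k' => (o k').map (fun a => (k', w k' a)))).reverse.find?
            (fun q => q.1 == k)) = none := by
          rw [List.find?_eq_none]
          intro q hq
          obtain ⟨k'', hk'', hq⟩ := List.mem_filterMap.1 (List.mem_reverse.1 hq)
          obtain ⟨a'', _, rfl⟩ := Option.map_eq_some_iff.1 hq
          simp only [Bool.not_eq_true, beq_eq_false_iff_ne, ne_eq]
          intro hqk
          exact hknotS (hqk ▸ hk'')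
        rw [hnone, Option.none_or]
        simp [h]
      · have hne : k ≠ k' := by
          rintro rfl; exact (List.nodup_cons.1 hnd).1 hkS
        rw [ih hnd' k hkS hsome]
        obtain ⟨a', ha'⟩ := Option.isSome_iff_exists.1 hsome
        simp [ha']

-- every key of my_list has an entry in enumerate my_list (seen from the reverse)
lemma enumerate_find?_isSome (L : List String) (k : String) (hk : k ∈ L) :
    ((PySem.List.enumerate L).reverse.find? (fun p => p.2 == k)).isSome := by
  rw [List.find?_isSome]
  obtain ⟨i, hi, rfl⟩ := List.mem_iff_getElem.1 hk
  refine ⟨((i : Int), L[i]), List.mem_reverse.2 ?_, by simp⟩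
  rw [PySem.List.mem_enumerate_iff]
  exact ⟨i, hi, by simp⟩

-- ===== VERDICT (by name: the statement is the Claim_ definition above) =====
theorem my_from_keys_spec : Claim_equal_my_from_keys := by
  intro L E _
  unfold Spec_my_from_keys my_from_keys my_from_keys_alt
  show _ = ((((PySem.List.enumerate L).foldl (fun d p => d.insert p.2 p.1)
      PySem.Dict.empty).items).foldl
      (fun d p => d.insert p.1 (if p.2 < (E.length : Int) then PySem.List.pyGet? E p.2 else none))
      PySem.Dict.empty).items
  -- A's side: items = first-occurrence keys, each paired with the element at its last occurrence index
  have hA : (myFromKeysLoop L E 0 0 PySem.Dict.empty).items =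
      (PySem.Set.ofList L).filterMap
        (fun k => ((PySem.List.enumerate L).reverse.find? (fun p => p.2 == k)).map
          (fun p => (k, if p.1 < (E.length : Int) then PySem.List.pyGet? E p.1 else none))) := by
    rw [myFromKeysLoop_eq L L E 0 0 PySem.Dict.empty (by omega) (by omega) (by omega) (by simp)]
    simp only [Int.toNat_zero, List.drop_zero]
    rw [zip_pad_eq, List.foldl_map]
    have h := items_foldl_insert_by (fun p : Int × String => p.2)
      (fun p : Int × String => if p.1 < (E.length : Int) then PySem.List.pyGet? E p.1 else none)
      (PySem.List.enumerate L)
    rw [PySem.List.map_snd_enumerate] at h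
    exact h
  rw [hA]
  -- B's side, pass 1
  have hlast : ((PySem.List.enumerate L).foldl (fun d p => d.insert p.2 p.1)
        PySem.Dict.empty).items =
      (PySem.Set.ofList L).filterMap
        (fun k => ((PySem.List.enumerate L).reverse.find? (fun p => p.2 == k)).map
          (fun p => (k, p.1))) := by
    have h := items_foldl_insert_by (fun p : Int × String => p.2)
      (fun p : Int × String => p.1) (PySem.List.enumerate L)
    rw [PySem.List.map_snd_enumerate] at h
    exact h
  rw [hlast]
  -- B's side, pass 2
  have hB := items_foldl_insert_by (fun q : String × Int => q.1)
    (fun q : String × Int => if q.2 < (E.length : Int) then PySem.List.pyGet? E q.2 else none)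
    ((PySem.Set.ofList L).filterMap
      (fun k => ((PySem.List.enumerate L).reverse.find? (fun p => p.2 == k)).map
        (fun p => (k, p.1))))
  rw [hB]
  have hfst : (((PySem.Set.ofList L).filterMap
      (fun k => ((PySem.List.enumerate L).reverse.find? (fun p => p.2 == k)).map
        (fun p => (k, p.1)))).map (fun q : String × Int => q.1)) = PySem.Set.ofList L := by
    rw [map_fst_filterMap_shape (PySem.Set.ofList L)
      (fun k => (PySem.List.enumerate L).reverse.find? (fun p => p.2 == k)) (fun k p => p.1)]
    apply List.filter_eq_self.2
    intro k hk
    exact enumerate_find?_isSome L k ((PySem.Set.mem_ofList _ _).1 hk)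
  rw [hfst, set_ofList_of_nodup _ (PySem.Set.nodup_ofList L)]
  apply List.filterMap_congr
  intro k hk
  rw [find?_filterMap_shape (fun k => (PySem.List.enumerate L).reverse.find? (fun p => p.2 == k))
    (fun k p => p.1) (PySem.Set.ofList L) (PySem.Set.nodup_ofList L) k hk
    (enumerate_find?_isSome L k ((PySem.Set.mem_ofList _ _).1 hk))]
  simp only [Option.map_map]
  rfl
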